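-- pv_equiv track=rewrite | github.com/luffy2106/coding-exercises | algo_practice/recursive/templates/subproblems/Gorgias_Machine_Learning_Engineer/EfficientWorkers.py | find_min_cost
-- ===== SOURCE A (Python) =====
-- import copy
--
-- def generate_list_pairs(list_num, current_list_pairs, possible_list_pairs):
--     if len(list_num) == 0:
--         # Break our of recursive
--         # current_list_pairs.append(list_num)
--         possible_list_pairs.append(current_list_pairs)
--         return None
--     else:
--         # Do the recursive
--         for i in range(len(list_num)):
--             for j in range(len(list_num)):
--                 if j != i:
--                     pairs = [list_num[i], list_num[j]]
--                     list_remain = [list_num[x] for x in range(len(list_num)) if x!=i and x!=j]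
--                     temp = copy.deepcopy(current_list_pairs)
--                     temp.append(pairs)
--                     generate_list_pairs(list_remain, temp, possible_list_pairs)
--
-- def min_cost_possible_list_pairs(possible_list_pairs, minimum_cost):
--     for list_pairs in possible_list_pairs:
--         cost = 0
--         for pairs in list_pairs:
--             cost = cost + abs(pairs[0]-pairs[1])
--         if cost < minimum_cost:
--             minimum_cost = cost
--     return minimum_cost
--
-- def find_min_cost(efficiency):
--
--     list_minimum_cost = []
--     for exclude_worker in efficiency:
--         minimum_cost_case = pow(10,9) * pow(10,5)
--         include_workers = [worker for worker in efficiency if worker!=exclude_worker]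
--         current_list_pairs = []
--         possible_list_pairs=[]
--         generate_list_pairs(include_workers, current_list_pairs, possible_list_pairs)
--         minimum_cost_case = min_cost_possible_list_pairs(possible_list_pairs, minimum_cost_case)
--         list_minimum_cost.append(minimum_cost_case)
--
--     minimum_cost = min(list_minimum_cost)
--     return minimum_cost
-- ===== SOURCE B (Python) =====
-- INF = 10 ** 14  # "no pairing possible" sentinel, same as A's pow(10,9)*pow(10,5)
--
-- def _min_pair_cost(vals):
--     # vals must have even length; minimum total |a-b| over perfect pairings,
--     # branching only on who vals[0] is paired with.
--     if not vals:
--         return 0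
--     first, rest = vals[0], vals[1:]
--     return min(abs(first - rest[j]) + _min_pair_cost(rest[:j] + rest[j + 1:])
--                for j in range(len(rest)))
--
-- def find_min_cost(efficiency):
--     best = None
--     for v in dict.fromkeys(efficiency):  # each distinct exclusion value once
--         remaining = [w for w in efficiency if w != v]
--         cost = INF if len(remaining) % 2 == 1 else min(_min_pair_cost(remaining), INF)
--         if best is None or cost < best:
--             best = cost
--     return best
-- ===== Notes on version B (the rewrite author's own statement) =====
-- stated objective: faster
-- what changed: B replaces A's recursive enumeration of every ordered pairing sequence (deep-copying the accumulator at each branch) by a branch-on-first-element minimum recursion over canonical pairings, and runs the exclusion loop once per distinct value instead of once per occurrence.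
import Mathlib
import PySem

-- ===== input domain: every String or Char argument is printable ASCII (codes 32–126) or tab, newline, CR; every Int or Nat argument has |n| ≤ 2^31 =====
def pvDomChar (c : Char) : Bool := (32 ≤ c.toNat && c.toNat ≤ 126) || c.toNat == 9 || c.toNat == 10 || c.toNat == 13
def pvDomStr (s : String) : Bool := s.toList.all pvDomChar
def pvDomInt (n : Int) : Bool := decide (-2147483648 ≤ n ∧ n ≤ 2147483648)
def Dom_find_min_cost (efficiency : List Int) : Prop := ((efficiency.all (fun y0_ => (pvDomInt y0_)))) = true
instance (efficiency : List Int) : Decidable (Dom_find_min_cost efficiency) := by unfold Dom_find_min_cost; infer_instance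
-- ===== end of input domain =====

-- B replaces A's exhaustive recursive generation of every ordered pairing sequence (with a
-- deepcopied accumulator per branch) by a branch-on-first-element minimum recursion over
-- canonical pairings, and runs the exclusion loop once per distinct value; return value only.

-- ===== PORT A =====

-- list_remain = [list_num[x] for x in range(len(list_num)) if x != i and x != j]
-- (indices produced by range(len(..)) are nonnegative and in range, so List.getD is exact here)
def pvRemain (l : List Int) (i j : Nat) : List Int :=
  ((List.range l.length).filter (fun x => x != i && x != j)).map (fun x => l.getD x 0)

-- the nested 'for i in range(n): for j in range(n):' loop, iterated as the row-major list of
-- index pairs; the bound hypothesis on the pairs records that they come from range(n) (needed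
-- for termination) and is erased at runtime.
mutual
def generate_list_pairs (list_num : List Int) (current : List (Int × Int))
    (possible : List (List (Int × Int))) : List (List (Int × Int)) :=
  if list_num.length = 0 then possible ++ [current]
  else
    genLoop list_num current possible
      ((List.range list_num.length).flatMap
        (fun i => (List.range list_num.length).map (fun j => (i, j))))
      (by
        intro p hp
        simp only [List.mem_flatMap, List.mem_map, List.mem_range] at hp
        obtain ⟨i, hi, j, hj, rfl⟩ := hp
        exact ⟨hi, hj⟩)
termination_by (list_num.length, 1, 0)
decreasing_by
  exact Prod.Lex.right _ (Prod.Lex.left _ _ (by omega))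

def genLoop (list_num : List Int) (current : List (Int × Int))
    (possible : List (List (Int × Int))) :
    (ks : List (Nat × Nat)) → (∀ p ∈ ks, p.1 < list_num.length ∧ p.2 < list_num.length) →
    List (List (Int × Int))
  | [], _ => possible
  | (i, j) :: ks', h =>
    genLoop list_num current
      (if _hij : j ≠ i then
        generate_list_pairs (pvRemain list_num i j)
          (current ++ [(list_num.getD i 0, list_num.getD j 0)]) possible
       else possible)
      ks' (fun p hp => h p (List.mem_cons_of_mem _ hp))
termination_by ks _ => (list_num.length, 0, ks.length)
decreasing_by
  · -- pvRemain removes the two distinct in-range indices i and j, so it is strictly shorter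
    have hb := h (i, j) (List.mem_cons_self)
    have hlt : (pvRemain list_num i j).length < list_num.length := by
      have h2 : ((List.range list_num.length).filter (fun x => x != i && x != j)).length <
          (List.range list_num.length).length :=
        List.length_filter_lt_length_iff_exists.mpr ⟨i, by simp [hb.1], by simp⟩
      simpa [pvRemain] using h2
    exact Prod.Lex.left _ _ hlt
  · exact Prod.Lex.right _ (Prod.Lex.right _ (by simp only [List.length_cons]; omega))
end

def min_cost_possible_list_pairs (possible : List (List (Int × Int))) (minimumCost : Int) : Int :=
  possible.foldl
    (fun m listPairs =>
      let cost := listPairs.foldl (fun c p => c + |p.1 - p.2|) 0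
      if cost < m then cost else m)
    minimumCost

def find_min_cost (efficiency : List Int) : Int :=
  let listMinimumCost := efficiency.foldl
    (fun acc excludeWorker =>
      let includeWorkers := efficiency.filter (fun w => w != excludeWorker)
      let possible := generate_list_pairs includeWorkers [] []
      acc ++ [min_cost_possible_list_pairs possible (10 ^ 9 * 10 ^ 5)])
    []
  -- min(list) raises ValueError on an empty list: Pre_ requires efficiency ≠ []
  (PySem.List.min? listMinimumCost (fun x => x)).getD 0

-- ===== PORT B =====

def pvINF : Int := 10 ^ 14

-- min over a generator: min? (none = Python's ValueError on an empty generator; the caller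
-- only reaches this with even-length input, where the generator is nonempty)
def minPairCost : List Int → Int
  | [] => 0
  | v :: rest =>
    (PySem.List.min?
      ((List.range rest.length).map
        (fun j => |v - rest.getD j 0| + minPairCost (rest.take j ++ rest.drop (j + 1))))
      (fun x => x)).getD 0
termination_by l => l.length
decreasing_by
  simp only [List.length_append, List.length_take, List.length_drop, List.length_cons]
  omega

def find_min_cost_alt (efficiency : List Int) : Int :=
  ((PySem.List.dedup efficiency).foldl
    (fun (best : Option Int) v =>
      let remaining := efficiency.filter (fun w => w != v)
      let cost := if remaining.length % 2 = 1 then pvINF else min (minPairCost remaining) pvINF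
      match best with
      | none => some cost
      | some b => if cost < b then some cost else some b)
    none).getD 0

-- ===== PRECONDITION & SPEC =====
-- Pre_ excludes only the empty list, on which A raises ValueError (min() of an empty sequence).
def Pre_find_min_cost (efficiency : List Int) : Prop := efficiency ≠ []
instance (efficiency : List Int) : Decidable (Pre_find_min_cost efficiency) := by
  unfold Pre_find_min_cost; infer_instance

def pvWitness_find_min_cost : List Int := [5, 5, 1, 7]

def Spec_find_min_cost (efficiency : List Int) (out : Int) : Prop := out = find_min_cost_alt efficiency
instance (efficiency : List Int) (out : Int) : Decidable (Spec_find_min_cost efficiency out) := by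
  unfold Spec_find_min_cost; infer_instance

-- ===== CLAIM (what is proved, stated in full; the proofs are below) =====
def Claim_equal_find_min_cost : Prop := ∀ (efficiency : List Int), Dom_find_min_cost efficiency → Pre_find_min_cost efficiency → Spec_find_min_cost efficiency (find_min_cost efficiency)

-- ===== LEMMAS AND PROOFS =====

-- `pvSub s u` reads out the entries of s at the index list u (all pairing proofs are phrased
-- over surviving-index lists, so that removing a worker is a value-level filter on u).
def pvSub (s : List Int) (u : List Nat) : List Int := u.map (fun x => s.getD x 0)

def pcost (ps : List (Int × Int)) : Int := ps.foldl (fun c p => c + |p.1 - p.2|) 0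

-- cost of pairing workers i and j first, plus the best cost of the rest
def pvVal (l : List Int) (i j : Nat) : Int :=
  |l.getD i 0 - l.getD j 0| + minPairCost (pvRemain l i j)

def pvStep (l : List Int) (K : Int) (b : Int) (p : Nat × Nat) : Int :=
  if p.2 ≠ p.1 then min b (K + pvVal l p.1 p.2) else b

def pvAllPairs (n : Nat) : List (Nat × Nat) :=
  (List.range n).flatMap (fun i => (List.range n).map (fun j => (i, j)))

theorem map_getD_range (l : List Int) :
    (List.range l.length).map (fun i => l.getD i 0) = l := by
  apply List.ext_getElem (by simp)
  intro i h1 h2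
  simp [List.getD_eq_getElem?_getD, List.getElem?_eq_getElem h2]

theorem sub_range (l : List Int) : pvSub l (List.range l.length) = l := map_getD_range l

theorem pvRemain_eq_sub (l : List Int) (i j : Nat) :
    pvRemain l i j = pvSub l ((List.range l.length).filter (fun x => x != i && x != j)) := rfl

theorem mem_allPairs {n i j : Nat} : (i, j) ∈ pvAllPairs n ↔ i < n ∧ j < n := by
  simp only [pvAllPairs, List.mem_flatMap, List.mem_map, List.mem_range]
  constructor
  · rintro ⟨i', hi', j', hj', h⟩
    cases h; exact ⟨hi', hj'⟩
  · rintro ⟨hi, hj⟩; exact ⟨i, hi, j, hj, rfl⟩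

theorem min?_getD_le {xs : List Int} {x : Int} (hx : x ∈ xs) :
    (PySem.List.min? xs (fun y => y)).getD 0 ≤ x := by
  cases h : PySem.List.min? xs (fun y => y) with
  | none => exact absurd ((PySem.List.min?_eq_none_iff _ _).mp h ▸ hx) (List.not_mem_nil)
  | some m => simpa using PySem.List.min?_isMin h x hx

theorem min?_getD_mem {xs : List Int} (hxs : xs ≠ []) :
    (PySem.List.min? xs (fun y => y)).getD 0 ∈ xs := by
  cases h : PySem.List.min? xs (fun y => y) with
  | none => exact absurd ((PySem.List.min?_eq_none_iff _ _).mp h) hxs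
  | some m => simpa using PySem.List.min?_mem h

theorem ite_lt_eq_min (c m : Int) : (if c < m then c else m) = min m c := by
  split_ifs <;> omega

theorem pcost_append (a b : List (Int × Int)) : pcost (a ++ b) = pcost a + pcost b := by
  simp only [pcost, PySem.List.foldl_add]
  simp

theorem pcost_single (x y : Int) : pcost [(x, y)] = |x - y| := by
  simp [pcost]

theorem filter_two_length (u : List Nat) (hnd : u.Nodup) (a b : Nat)
    (ha : a ∈ u) (hb : b ∈ u) (hab : a ≠ b) :
    (u.filter (fun x => x != a && x != b)).length = u.length - 2 := by
  rw [← List.filter_filter]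
  rw [← List.Nodup.erase_eq_filter hnd b]
  rw [← List.Nodup.erase_eq_filter (hnd.erase b) a]
  rw [List.length_erase_of_mem (List.mem_erase_of_ne hab |>.mpr ha)]
  rw [List.length_erase_of_mem hb]
  omega

theorem pvRemain_length (l : List Int) (i j : Nat) (hi : i < l.length) (hj : j < l.length)
    (hij : i ≠ j) : (pvRemain l i j).length = l.length - 2 := by
  have := filter_two_length (List.range l.length) (List.nodup_range)
    i j (List.mem_range.mpr hi) (List.mem_range.mpr hj) hij
  simpa [pvRemain] using this

-- unfolding B's recursion over an index list: candidates indexed by the surviving indices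
theorem minPairCost_sub_cons (s : List Int) (c0 : Nat) (u' : List Nat) (hnd : u'.Nodup) :
    minPairCost (pvSub s (c0 :: u')) =
      (PySem.List.min?
        (u'.map (fun d => |s.getD c0 0 - s.getD d 0| +
          minPairCost (pvSub s (u'.filter (· != d)))))
        (fun x => x)).getD 0 := by
  have hcons : pvSub s (c0 :: u') = s.getD c0 0 :: pvSub s u' := rfl
  rw [hcons, minPairCost]
  congr 2
  apply List.ext_getElem (by simp [pvSub])
  intro k h1 h2
  have hk : k < u'.length := by simpa [pvSub] using h2
  simp only [List.getElem_map, List.getElem_range]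
  have e1 : (pvSub s u').getD k 0 = s.getD u'[k] 0 := by
    rw [List.getD_eq_getElem _ _ (by simpa [pvSub] using hk)]
    simp [pvSub]
  have e2 : (pvSub s u').take k ++ (pvSub s u').drop (k + 1) =
      pvSub s (u'.filter (· != u'[k])) := by
    rw [← List.eraseIdx_eq_take_drop_succ]
    unfold pvSub
    rw [List.eraseIdx_map]
    congr 1
    rw [← List.Nodup.erase_getElem hnd k hk]
    exact List.Nodup.erase_eq_filter hnd _
  rw [e1, e2]

-- the exchange lemma: pairing any two distinct surviving workers first cannot beat the optimum
theorem crux (s : List Int) : ∀ (n : Nat) (u : List Nat), u.length = n → u.Nodup →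
    ∀ a b : Nat, a ∈ u → b ∈ u → a ≠ b → u.length % 2 = 0 →
    minPairCost (pvSub s u) ≤
      |s.getD a 0 - s.getD b 0| +
        minPairCost (pvSub s (u.filter (fun x => x != a && x != b))) := by
  intro n
  induction n using Nat.strong_induction_on with
  | _ n IH =>
    intro u hlen hnd a b ha hb hab hev
    obtain ⟨c0, u', rfl⟩ : ∃ c0 u', u = c0 :: u' := by
      cases u with
      | nil => exact absurd ha (List.not_mem_nil)
      | cons x t => exact ⟨x, t, rfl⟩
    have hndu' : u'.Nodup := List.Nodup.of_cons hnd
    have hc0 : c0 ∉ u' := (List.nodup_cons.mp hnd).1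
    by_cases hac : a = c0
    · subst hac
      have hbu' : b ∈ u' := by
        rcases List.mem_cons.mp hb with h | h
        · exact absurd h.symm hab
        · exact h
      rw [minPairCost_sub_cons _ _ _ hndu']
      have hfil : (a :: u').filter (fun x => x != a && x != b) = u'.filter (· != b) := by
        rw [List.filter_cons]
        simp only [bne_self_eq_false, Bool.false_and, Bool.false_eq_true, if_false]
        exact List.filter_congr (by
          intro x hx
          have hxc : x ≠ a := by rintro rfl; exact hc0 hx
          simp [hxc])
      rw [hfil]
      exact min?_getD_le (List.mem_map_of_mem hbu')
    · by_cases hbc : b = c0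
      · subst hbc
        have hau' : a ∈ u' := by
          rcases List.mem_cons.mp ha with h | h
          · exact absurd h hac
          · exact h
        rw [minPairCost_sub_cons _ _ _ hndu']
        have hfil : (b :: u').filter (fun x => x != a && x != b) = u'.filter (· != a) := by
          rw [List.filter_cons]
          simp only [bne_self_eq_false, Bool.and_false, Bool.false_eq_true, if_false]
          exact List.filter_congr (by
            intro x hx
            have hxc : x ≠ b := by rintro rfl; exact hc0 hx
            simp [hxc])
        rw [hfil, abs_sub_comm]
        exact min?_getD_le (List.mem_map_of_mem hau')
      · have hau' : a ∈ u' := by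
          rcases List.mem_cons.mp ha with h | h
          · exact absurd h hac
          · exact h
        have hbu' : b ∈ u' := by
          rcases List.mem_cons.mp hb with h | h
          · exact absurd h hbc
          · exact h
        set w := u'.filter (fun x => x != a && x != b) with hw
        have hfil : (c0 :: u').filter (fun x => x != a && x != b) = c0 :: w := by
          rw [List.filter_cons]
          have h1 : (c0 != a && c0 != b) = true := by
            simp
            exact ⟨fun e => hac e.symm, fun e => hbc e.symm⟩
          rw [h1, if_pos rfl]
        rw [hfil]
        have hndw : w.Nodup := hndu'.filter _
        rw [minPairCost_sub_cons s c0 u' hndu', minPairCost_sub_cons s c0 w hndw]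
        have hlu' : u'.length % 2 = 1 := by
          have h := hev
          rw [List.length_cons] at h
          omega
        have hwlen : w.length = u'.length - 2 := filter_two_length u' hndu' a b hau' hbu' hab
        have hu'2 : 2 ≤ u'.length := by
          cases u' with
          | nil => exact absurd hau' (List.not_mem_nil)
          | cons x t =>
            cases t with
            | nil =>
              simp only [List.mem_singleton] at hau' hbu'
              exact absurd (hau'.trans hbu'.symm) hab
            | cons y t2 => simp only [List.length_cons]; omega
        have hu'3 : 3 ≤ u'.length := by omega
        have hwne : w.map (fun d => |s.getD c0 0 - s.getD d 0| +
            minPairCost (pvSub s (w.filter (· != d)))) ≠ [] := by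
          have h0 : 0 < w.length := by rw [hwlen]; omega
          intro h
          have hl0 := congrArg List.length h
          simp only [List.length_map, List.length_nil] at hl0
          omega
        obtain hmem := min?_getD_mem hwne
        obtain ⟨d0, hd0w, hd0eq⟩ := List.mem_map.mp hmem
        have hd0f := List.mem_filter.mp (hw ▸ hd0w)
        have hd0u' : d0 ∈ u' := hd0f.1
        have hd0ab : d0 ≠ a ∧ d0 ≠ b := by
          have := hd0f.2
          constructor
          · intro e; rw [e] at this; simp at this
          · intro e; rw [e] at this; simp at this
        have hL : (PySem.List.min? (u'.map (fun d => |s.getD c0 0 - s.getD d 0| +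
              minPairCost (pvSub s (u'.filter (· != d))))) (fun x => x)).getD 0 ≤
            |s.getD c0 0 - s.getD d0 0| + minPairCost (pvSub s (u'.filter (· != d0))) :=
          min?_getD_le (List.mem_map_of_mem hd0u')
        have hu''nd : (u'.filter (· != d0)).Nodup := hndu'.filter _
        have hu''len : (u'.filter (· != d0)).length = u'.length - 1 := by
          rw [← List.Nodup.erase_eq_filter hndu' d0, List.length_erase_of_mem hd0u']
        have hIH := IH (u'.length - 1) (by simp only [List.length_cons] at hlen; omega)
          (u'.filter (· != d0)) hu''len hu''nd a b
          (List.mem_filter.mpr ⟨hau', by simp [Ne.symm hd0ab.1]⟩)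
          (List.mem_filter.mpr ⟨hbu', by simp [Ne.symm hd0ab.2]⟩)
          hab (by rw [hu''len]; omega)
        have hcomp : (u'.filter (· != d0)).filter (fun x => x != a && x != b) =
            w.filter (· != d0) := by
          rw [List.filter_filter, hw, List.filter_filter]
          exact List.filter_congr (by
            intro x _
            cases h1 : x != a <;> cases h2 : x != b <;> cases h3 : x != d0 <;> rfl)
        rw [hcomp] at hIH
        rw [← hd0eq]
        omega

-- A's generator appends nothing when the list has odd length
theorem genLoop_poss_odd (l : List Int) (hodd : l.length % 2 = 1)
    (IH : ∀ l' : List Int, l'.length < l.length → l'.length % 2 = 1 →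
      ∀ cur poss, generate_list_pairs l' cur poss = poss) :
    ∀ (ks : List (Nat × Nat)) (h : ∀ p ∈ ks, p.1 < l.length ∧ p.2 < l.length)
      (cur : List (Int × Int)) (poss : List (List (Int × Int))),
      genLoop l cur poss ks h = poss := by
  intro ks
  induction ks with
  | nil => intro h cur poss; rw [genLoop]
  | cons p ks' ihks =>
    obtain ⟨i, j⟩ := p
    intro h cur poss
    rw [genLoop]
    rw [ihks]
    split
    · next hij =>
      have hb := h (i, j) (List.mem_cons_self)
      have hlen := pvRemain_length l i j hb.1 hb.2 (Ne.symm hij)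
      have h3 : 3 ≤ l.length := by
        have h1 := hb.1; have h2 := hb.2
        omega
      exact IH _ (by omega) (by omega) _ _
    · rfl

theorem gen_odd : ∀ (n : Nat) (l : List Int), l.length = n → l.length % 2 = 1 →
    ∀ cur poss, generate_list_pairs l cur poss = poss := by
  intro n
  induction n using Nat.strong_induction_on with
  | _ n IH =>
    intro l hlen hodd cur poss
    rw [generate_list_pairs]
    rw [if_neg (by omega)]
    exact genLoop_poss_odd l hodd (fun l' hl' ho' => IH l'.length (hlen ▸ hl') l' rfl ho') _ _ _ _

-- the fold over candidate index pairs: basic min-fold facts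
theorem foldl_pvStep_le_init (l : List Int) (K : Int) :
    ∀ (ks : List (Nat × Nat)) (b : Int), ks.foldl (pvStep l K) b ≤ b := by
  intro ks
  induction ks with
  | nil => intro b; exact le_rfl
  | cons p ks' ih =>
    intro b
    have h1 : pvStep l K b p ≤ b := by unfold pvStep; split <;> omega
    calc List.foldl (pvStep l K) (pvStep l K b p) ks' ≤ pvStep l K b p := ih _
    _ ≤ b := h1

theorem foldl_pvStep_le_mem (l : List Int) (K : Int) :
    ∀ (ks : List (Nat × Nat)) (b : Int) (p : Nat × Nat), p ∈ ks → p.2 ≠ p.1 →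
      ks.foldl (pvStep l K) b ≤ K + pvVal l p.1 p.2 := by
  intro ks
  induction ks with
  | nil => intro b p hp; exact absurd hp (List.not_mem_nil)
  | cons q ks' ih =>
    intro b p hp hv
    rcases List.mem_cons.mp hp with h | h
    · subst h
      simp only [List.foldl_cons]
      calc List.foldl (pvStep l K) (pvStep l K b p) ks' ≤ pvStep l K b p :=
            foldl_pvStep_le_init l K _ _
        _ ≤ K + pvVal l p.1 p.2 := by unfold pvStep; rw [if_pos hv]; omega
    · exact ih _ p h hv

theorem foldl_pvStep_ge (l : List Int) (K W : Int) :
    ∀ (ks : List (Nat × Nat)), (∀ p ∈ ks, p.2 ≠ p.1 → W ≤ K + pvVal l p.1 p.2) →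
      ∀ b, min b W ≤ ks.foldl (pvStep l K) b := by
  intro ks
  induction ks with
  | nil => intro _ b; simp
  | cons q ks' ih =>
    intro h b
    simp only [List.foldl_cons]
    have hq : min b W ≤ min (pvStep l K b q) W := by
      have h1 : pvStep l K b q = b ∨ (q.2 ≠ q.1 ∧ pvStep l K b q = min b (K + pvVal l q.1 q.2)) := by
        unfold pvStep; split
        · next hv => exact Or.inr ⟨hv, rfl⟩
        · exact Or.inl rfl
      rcases h1 with h1 | ⟨hv, h1⟩
      · omega
      · have := h q (List.mem_cons_self) hv
        omega
    calc min b W ≤ min (pvStep l K b q) W := hq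
      _ ≤ List.foldl (pvStep l K) (pvStep l K b q) ks' :=
          ih (fun p hp => h p (List.mem_cons_of_mem _ hp)) _

-- mcp over the loop, as a min-fold over the candidate pairs
theorem genLoop_mcp (l : List Int) (cur : List (Int × Int)) (hev : l.length % 2 = 0)
    (IH : ∀ l' : List Int, l'.length < l.length → l'.length % 2 = 0 →
      ∀ cur' poss' m', min_cost_possible_list_pairs (generate_list_pairs l' cur' poss') m' =
        min (min_cost_possible_list_pairs poss' m') (pcost cur' + minPairCost l')) :
    ∀ (ks : List (Nat × Nat)) (h : ∀ p ∈ ks, p.1 < l.length ∧ p.2 < l.length)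
      (poss : List (List (Int × Int))) (m : Int),
      min_cost_possible_list_pairs (genLoop l cur poss ks h) m =
        ks.foldl (pvStep l (pcost cur)) (min_cost_possible_list_pairs poss m) := by
  intro ks
  induction ks with
  | nil => intro h poss m; rw [genLoop]; rfl
  | cons p ks' ihks =>
    obtain ⟨i, j⟩ := p
    intro h poss m
    rw [genLoop]
    rw [ihks (fun p hp => h p (List.mem_cons_of_mem _ hp))]
    simp only [List.foldl_cons]
    congr 1
    split
    · next hij =>
      have hb := h (i, j) (List.mem_cons_self)
      have hlen := pvRemain_length l i j hb.1 hb.2 (Ne.symm hij)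
      have h2 : 2 ≤ l.length := by
        have ha1 := hb.1; have ha2 := hb.2
        omega
      rw [IH _ (by omega) (by omega)]
      unfold pvStep pvVal
      rw [if_pos hij, pcost_append, pcost_single]
      ring_nf
    · next hij =>
      unfold pvStep
      rw [if_neg hij]

-- the optimum is attained by pairing worker 0 with some other worker
theorem minPairCost_attained (l : List Int) (h2 : 2 ≤ l.length) :
    ∃ d0, 0 < d0 ∧ d0 < l.length ∧ minPairCost l = pvVal l 0 d0 := by
  set u' := (List.range (l.length - 1)).map Nat.succ with hu'
  have hrange : List.range l.length = 0 :: u' := by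
    rw [show l.length = (l.length - 1) + 1 by omega, List.range_succ_eq_map]
  have hndu' : u'.Nodup := List.nodup_range.map Nat.succ_injective
  have hmain : minPairCost l =
      (PySem.List.min? (u'.map (fun d => |l.getD 0 0 - l.getD d 0| +
        minPairCost (pvSub l (u'.filter (· != d))))) (fun x => x)).getD 0 := by
    conv_lhs => rw [← sub_range l, hrange]
    exact minPairCost_sub_cons l 0 u' hndu'
  have hu'ne : u'.map (fun d => |l.getD 0 0 - l.getD d 0| +
      minPairCost (pvSub l (u'.filter (· != d)))) ≠ [] := by
    intro h
    rw [← List.length_eq_zero_iff] at h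
    simp [hu'] at h
    omega
  obtain ⟨d0, hd0u', hd0eq⟩ := List.mem_map.mp (min?_getD_mem hu'ne)
  have hd0pos : 0 < d0 := by
    rw [hu'] at hd0u'
    obtain ⟨k, _, rfl⟩ := List.mem_map.mp hd0u'
    exact Nat.succ_pos k
  have hd0lt : d0 < l.length := by
    rw [hu'] at hd0u'
    obtain ⟨k, hk, rfl⟩ := List.mem_map.mp hd0u'
    have := List.mem_range.mp hk
    omega
  refine ⟨d0, hd0pos, hd0lt, ?_⟩
  rw [hmain, ← hd0eq]
  unfold pvVal
  congr 1
  rw [pvRemain_eq_sub]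
  congr 1
  rw [hrange, List.filter_cons]
  have hcong : u'.filter (fun x => x != 0 && x != d0) = u'.filter (· != d0) :=
    List.filter_congr (fun x hx => by
      have hx0 : x ≠ 0 := by
        rw [hu'] at hx
        obtain ⟨k, _, rfl⟩ := List.mem_map.mp hx
        exact Nat.succ_ne_zero k
      simp [hx0])
  simp only [bne_self_eq_false, Bool.false_and, Bool.false_eq_true, if_false, hcong]

-- A's generator + fold-min computes exactly B's branch-on-first minimum (even length)
theorem gen_even : ∀ (n : Nat) (l : List Int), l.length = n → l.length % 2 = 0 →
    ∀ (cur : List (Int × Int)) (poss : List (List (Int × Int))) (m : Int),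
    min_cost_possible_list_pairs (generate_list_pairs l cur poss) m =
      min (min_cost_possible_list_pairs poss m) (pcost cur + minPairCost l) := by
  intro n
  induction n using Nat.strong_induction_on with
  | _ n IH =>
    intro l hlen hev cur poss m
    rw [generate_list_pairs]
    by_cases h0 : l.length = 0
    · rw [if_pos h0]
      have hl : l = [] := List.length_eq_zero_iff.mp h0
      subst hl
      simp only [min_cost_possible_list_pairs, List.foldl_append]
      rw [minPairCost]
      simp only [List.foldl_cons, List.foldl_nil]
      rw [show (List.foldl (fun c p => c + |p.1 - p.2|) 0 cur) = pcost cur from rfl]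
      rw [ite_lt_eq_min]
      omega
    · rw [if_neg h0]
      have IH' : ∀ l' : List Int, l'.length < l.length → l'.length % 2 = 0 →
          ∀ cur' poss' m', min_cost_possible_list_pairs (generate_list_pairs l' cur' poss') m' =
            min (min_cost_possible_list_pairs poss' m') (pcost cur' + minPairCost l') :=
        fun l' hl' he' => IH l'.length (hlen ▸ hl') l' rfl he'
      rw [genLoop_mcp l cur hev IH']
      rw [show ((List.range l.length).flatMap
          (fun i => (List.range l.length).map (fun j => (i, j)))) = pvAllPairs l.length from rfl]
      have h2 : 2 ≤ l.length := by omega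
      apply le_antisymm
      · apply le_min
        · exact foldl_pvStep_le_init l (pcost cur) _ _
        · obtain ⟨d0, hd0pos, hd0lt, hatt⟩ := minPairCost_attained l h2
          have hmem : (0, d0) ∈ pvAllPairs l.length := mem_allPairs.mpr ⟨by omega, hd0lt⟩
          have hle := foldl_pvStep_le_mem l (pcost cur) (pvAllPairs l.length)
            (min_cost_possible_list_pairs poss m) (0, d0) hmem (by simpa using Nat.pos_iff_ne_zero.mp hd0pos)
          rw [← hatt] at hle
          exact hle
      · apply foldl_pvStep_ge
        intro p hp hv
        obtain ⟨i, j⟩ := p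
        dsimp only at hv ⊢
        obtain ⟨hi, hj⟩ := mem_allPairs.mp hp
        have hcx := crux l l.length (List.range l.length) (by simp) List.nodup_range i j
          (List.mem_range.mpr hi) (List.mem_range.mpr hj) (Ne.symm hv) (by simp [hev])
        rw [sub_range, ← pvRemain_eq_sub] at hcx
        unfold pvVal
        omega

-- B's per-exclusion value, named
def pvG (eff : List Int) (v : Int) : Int :=
  if (eff.filter (fun w => w != v)).length % 2 = 1 then pvINF
  else min (minPairCost (eff.filter (fun w => w != v))) pvINF

-- per-exclusion value: A's exhaustive minimum equals B's guarded branch-on-first minimum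
theorem pointwise (eff : List Int) (v : Int) :
    min_cost_possible_list_pairs
      (generate_list_pairs (eff.filter (fun w => w != v)) [] []) (10 ^ 9 * 10 ^ 5) =
    pvG eff v := by
  unfold pvG
  set r := eff.filter (fun w => w != v) with hr
  by_cases hodd : r.length % 2 = 1
  · rw [gen_odd r.length r rfl hodd, if_pos hodd]
    show (10 : Int) ^ 9 * 10 ^ 5 = pvINF
    norm_num [pvINF]
  · have hev : r.length % 2 = 0 := by omega
    rw [gen_even r.length r rfl hev, if_neg hodd]
    show min ((10 : Int) ^ 9 * 10 ^ 5) (pcost [] + minPairCost r) = min (minPairCost r) pvINF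
    rw [show pcost [] = 0 from rfl, zero_add, min_comm]
    norm_num [pvINF]

-- the running-minimum fold of B's exclusion loop, characterised
theorem optfold_char (g : Int → Int) :
    ∀ (ys : List Int) (b : Int),
      ∃ c, ys.foldl (fun best v => match best with
          | none => some (g v)
          | some b => if g v < b then some (g v) else some b) (some b) = some c ∧
        c ≤ b ∧ (c = b ∨ ∃ y ∈ ys, c = g y) ∧ ∀ y ∈ ys, c ≤ g y := by
  intro ys
  induction ys with
  | nil => intro b; exact ⟨b, rfl, le_rfl, Or.inl rfl, by simp⟩
  | cons y ys ih =>
    intro b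
    simp only [List.foldl_cons]
    have hstep : (if g y < b then some (g y) else some b) =
        some (if g y < b then g y else b) := by split_ifs <;> rfl
    rw [hstep]
    obtain ⟨c, hc, hcb, hor, hall⟩ := ih (if g y < b then g y else b)
    refine ⟨c, hc, ?_, ?_, ?_⟩
    · split_ifs at hcb <;> omega
    · rcases hor with h | ⟨y', hy', h⟩
      · by_cases hlt : g y < b
        · rw [if_pos hlt] at h
          exact Or.inr ⟨y, List.mem_cons_self, h⟩
        · rw [if_neg hlt] at h
          exact Or.inl h
      · exact Or.inr ⟨y', List.mem_cons_of_mem _ hy', h⟩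
    · intro z hz
      rcases List.mem_cons.mp hz with h | h
      · subst h
        split_ifs at hcb <;> omega
      · exact hall z h

theorem alt_char (eff : List Int) (hne : eff ≠ []) :
    ∃ c, find_min_cost_alt eff = c ∧ (∃ v ∈ eff, c = pvG eff v) ∧ ∀ v ∈ eff, c ≤ pvG eff v := by
  obtain ⟨y0, ys, hd⟩ : ∃ y0 ys, PySem.List.dedup eff = y0 :: ys := by
    cases hdd : PySem.List.dedup eff with
    | nil =>
      exfalso
      obtain ⟨x, hx⟩ := List.exists_mem_of_ne_nil eff hne
      have := (PySem.List.mem_dedup _ _).mpr hx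
      rw [hdd] at this
      exact absurd this (List.not_mem_nil)
    | cons a t => exact ⟨a, t, rfl⟩
  obtain ⟨c, hc, hcb, hor, hall⟩ := optfold_char (pvG eff) ys (pvG eff y0)
  refine ⟨c, ?_, ?_, ?_⟩
  · show ((PySem.List.dedup eff).foldl _ none).getD 0 = c
    rw [hd]
    show (ys.foldl (fun best v => match best with
        | none => some (pvG eff v)
        | some b => if pvG eff v < b then some (pvG eff v) else some b)
        (some (pvG eff y0))).getD 0 = c
    rw [hc]
    rfl
  · have hy0 : y0 ∈ eff := (PySem.List.mem_dedup _ _).mp (hd ▸ List.mem_cons_self)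
    rcases hor with h | ⟨y', hy', h⟩
    · exact ⟨y0, hy0, h⟩
    · exact ⟨y', (PySem.List.mem_dedup _ _).mp (hd ▸ List.mem_cons_of_mem _ hy'), h⟩
  · intro v hv
    have hvd := (PySem.List.mem_dedup _ _).mpr hv
    rw [hd] at hvd
    rcases List.mem_cons.mp hvd with h | h
    · subst h; exact hcb
    · exact hall v h

-- ===== VERDICT (by name: the statement is the Claim_ definition above) =====
theorem find_min_cost_spec : Claim_equal_find_min_cost := by
  intro eff _hDom hPre
  unfold Spec_find_min_cost
  obtain ⟨c, hc, ⟨v0, hv0, hcv⟩, hall⟩ := alt_char eff hPre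
  rw [hc]
  simp only [find_min_cost]
  rw [PySem.List.foldl_append_singleton_eq_map, List.nil_append]
  have hmapne : eff.map (fun ew => min_cost_possible_list_pairs
      (generate_list_pairs (eff.filter (fun w => w != ew)) [] []) (10 ^ 9 * 10 ^ 5)) ≠ [] := by
    have hne : eff ≠ [] := hPre
    simp [hne]
  apply le_antisymm
  · rw [hcv, ← pointwise eff v0]
    exact min?_getD_le (List.mem_map_of_mem hv0)
  · obtain ⟨vA, hvA, hMA⟩ := List.mem_map.mp (min?_getD_mem hmapne)
    rw [← hMA, pointwise eff vA]
    exact hall vA hvA
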